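-- pv_equiv track=rewrite | github.com/MarynaSavchenko/logic | logic.py | writingout
-- ===== SOURCE A (Python) =====
-- def writingout(combinations, tabl):
--     """wypisanie tych kombinacji ze slownika combinations,
--     gdzie w tabl jest odpowiednia 1 """
--     newdict = {}
--     for i, j in zip(combinations, tabl):
--         if j == 1:
--             newdict[i]=combinations[i]
--     string = ""
--     num = 0
--     for i in newdict:
--         s = newdict[i]
--         for j in s:
--             if s[j]==1:
--                 string = string + j
--             elif s[j]==0:
--                 string = string  + j + '\''
--         num = num + 1
--         if num < len(newdict):
--             string +=  " " + "OR" + " "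
--     return string
-- ===== SOURCE B (Python) =====
-- def writingout(combinations, tabl):
--     """Build the result back-to-front: walk the selected entries in reverse,
--     prepending each term and adding ' OR ' only when something already
--     follows. No intermediate dict, no counter, no term list."""
--     out = ""
--     nonempty = False
--     for s, t in reversed(list(zip(combinations.values(), tabl))):
--         if t == 1:
--             term = "".join(j if v == 1 else j + "'" for j, v in s.items() if v in (0, 1))
--             out = term + (" OR " + out if nonempty else out)
--             nonempty = True
--     return out
-- ===== Notes on version B (the rewrite author's own statement) =====
-- stated objective: alternative
-- what changed: B builds the result string back-to-front: it walks the selected entries in reverse, prepending each term and adding ' OR ' only when something already follows, with each term produced by a filtered join; A's intermediate newdict, its num counter and its forward trailing-separator logic disappear.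
import Mathlib
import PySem

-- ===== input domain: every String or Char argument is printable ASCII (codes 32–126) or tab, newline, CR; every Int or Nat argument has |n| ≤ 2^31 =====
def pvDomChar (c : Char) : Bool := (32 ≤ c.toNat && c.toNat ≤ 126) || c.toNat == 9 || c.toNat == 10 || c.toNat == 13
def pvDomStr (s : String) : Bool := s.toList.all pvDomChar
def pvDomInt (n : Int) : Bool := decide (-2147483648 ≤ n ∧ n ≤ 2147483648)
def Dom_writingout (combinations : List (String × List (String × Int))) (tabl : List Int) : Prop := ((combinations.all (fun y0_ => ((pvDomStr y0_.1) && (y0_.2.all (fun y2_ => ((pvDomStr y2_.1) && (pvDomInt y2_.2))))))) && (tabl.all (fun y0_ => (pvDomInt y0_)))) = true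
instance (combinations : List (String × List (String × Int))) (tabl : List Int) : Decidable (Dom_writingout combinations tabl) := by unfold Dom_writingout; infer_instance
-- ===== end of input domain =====

-- B builds the result back-to-front (reversed walk, separator prepended only when something
-- already follows, terms by a filtered join), replacing A's intermediate dict, num counter and
-- forward trailing-separator logic (objective: alternative).
-- Both parameters are Python dicts modelled as association lists: each port applies
-- PySem.Dict.ofList (Python dict construction) exactly where Python holds the dict.

-- ===== PORT A =====

def writingout (combinations : List (String × List (String × Int))) (tabl : List Int) : String :=
  let comb : PySem.Dict String (List (String × Int)) := PySem.Dict.ofList combinations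
  let newdict : PySem.Dict String (List (String × Int)) :=
    (comb.keys.zip tabl).foldl
      (fun d ij => if ij.2 == 1 then d.insert ij.1 (comb.getD ij.1 []) else d)
      PySem.Dict.empty
  let res : String × Int :=
    newdict.keys.foldl
      (fun st i =>
        let s : PySem.Dict String Int := PySem.Dict.ofList (newdict.getD i [])
        let str1 : String := s.keys.foldl
          (fun str j =>
            if s.getD j 0 == 1 then str ++ j
            else if s.getD j 0 == 0 then str ++ j ++ "'"
            else str) st.1
        let num : Int := st.2 + 1
        (if num < (newdict.size : Int) then str1 ++ (" " ++ "OR" ++ " ") else str1, num))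
      ("", 0)
  res.1

-- ===== PORT B =====
-- "".join(j if v == 1 else j + "'" for j, v in s.items() if v in (0, 1))
def pvTermB (s : List (String × Int)) : String :=
  PySem.Str.join ""
    (((PySem.Dict.ofList s).items.filter (fun jv => jv.2 == 0 || jv.2 == 1)).map
      (fun jv => if jv.2 == 1 then jv.1 else jv.1 ++ "'"))

-- for s, t in reversed(list(zip(combinations.values(), tabl))): … = foldr over the zip list,
-- state (out, nonempty)
def writingout_alt (combinations : List (String × List (String × Int))) (tabl : List Int) : String :=
  (((PySem.Dict.ofList combinations).values.zip tabl).foldr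
    (fun st (acc : String × Bool) =>
      if st.2 == 1 then
        (pvTermB st.1 ++ (if acc.2 then " OR " ++ acc.1 else acc.1), true)
      else acc)
    ("", false)).1

-- ===== PRECONDITION & SPEC =====
def Spec_writingout (combinations : List (String × List (String × Int))) (tabl : List Int) (out : String) : Prop := out = writingout_alt combinations tabl
instance (combinations : List (String × List (String × Int))) (tabl : List Int) (out : String) : Decidable (Spec_writingout combinations tabl out) := by unfold Spec_writingout; infer_instance

-- ===== CLAIM (what is proved, stated in full; the proofs are below) =====
def Claim_equal_writingout : Prop := ∀ (combinations : List (String × List (String × Int))) (tabl : List Int), Dom_writingout combinations tabl → Spec_writingout combinations tabl (writingout combinations tabl)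

-- ===== LEMMAS AND PROOFS =====

-- proof-only helper: the value A's inner loop computes for one selected inner dict
def pvTerm (s : List (String × Int)) : String :=
  (PySem.Dict.ofList s).items.foldl
    (fun term jv =>
      if jv.2 == 1 then term ++ jv.1
      else if jv.2 == 0 then term ++ jv.1 ++ "'"
      else term) ""

theorem pv_map_fst_zip_sublist {α β : Type} (l : List α) (t : List β) :
    List.Sublist ((l.zip t).map Prod.fst) l := by
  induction l generalizing t with
  | nil => simp
  | cons a l ih =>
    cases t with
    | nil => simp
    | cons b t => simpa using List.Sublist.cons₂ a (ih t)

theorem pv_sel_nodup (combinations : List (String × List (String × Int))) (tabl : List Int) :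
    (((((PySem.Dict.ofList combinations).items.zip tabl).filter (fun p => p.2 == 1)).map (fun y => y.1.1))).Nodup := by
  have h1 : List.Sublist (((((PySem.Dict.ofList combinations).items.zip tabl).filter (fun p => p.2 == 1)).map (fun y => y.1.1)))
      (((PySem.Dict.ofList combinations).items.zip tabl).map (fun y => y.1.1)) :=
    List.Sublist.map _ List.filter_sublist
  have h2 : ((PySem.Dict.ofList combinations).items.zip tabl).map (fun y => (y.1.1 : String))
      = (((PySem.Dict.ofList combinations).items.zip tabl).map Prod.fst).map Prod.fst := by simp
  have h3 : List.Sublist (((PySem.Dict.ofList combinations).items.zip tabl).map (fun y => (y.1.1 : String)))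
      ((PySem.Dict.ofList combinations).items.map Prod.fst) := by
    rw [h2]; exact List.Sublist.map _ (pv_map_fst_zip_sublist _ _)
  exact ((h1.trans h3).nodup (PySem.Dict.nodup_keys_ofList combinations))

theorem pv_newdict_items (combinations : List (String × List (String × Int))) (tabl : List Int) :
    ((((PySem.Dict.ofList combinations).keys.zip tabl).foldl
      (fun d ij => if ij.2 == 1 then d.insert ij.1 ((PySem.Dict.ofList combinations).getD ij.1 []) else d)
      PySem.Dict.empty).items)
    = (((PySem.Dict.ofList combinations).items.zip tabl).filter (fun p => p.2 == 1)).map (·.1) := by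
  have hkeys : (PySem.Dict.ofList combinations).keys = (PySem.Dict.ofList combinations).items.map Prod.fst := rfl
  rw [hkeys, List.zip_map_left, List.foldl_map]
  simp only [Prod.map, id_eq]
  rw [← List.foldl_filter]
  rw [PySem.Dict.items_foldl_insert_fresh _ _ _ _ (fun a _ => PySem.Dict.contains_empty _)
      (pv_sel_nodup combinations tabl)]
  simp only [PySem.Dict.empty, List.nil_append]
  refine List.map_congr_left (fun a ha => ?_)
  have hmem : a.1 ∈ (PySem.Dict.ofList combinations).items :=
    (List.of_mem_zip (List.mem_of_mem_filter ha)).1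
  have := PySem.Dict.getD_of_mem_items (PySem.Dict.ofList combinations) (k := a.1.1) (v := a.1.2)
    (by simpa using hmem) (PySem.Dict.nodup_keys_ofList combinations) []
  simp [this]

theorem pv_shift (l : List (String × Int)) (str0 : String) :
    l.foldl (fun term jv =>
      if jv.2 == 1 then term ++ jv.1
      else if jv.2 == 0 then term ++ jv.1 ++ "'"
      else term) str0
    = str0 ++ l.foldl (fun term jv =>
      if jv.2 == 1 then term ++ jv.1
      else if jv.2 == 0 then term ++ jv.1 ++ "'"
      else term) "" := by
  induction l generalizing str0 with
  | nil => simp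
  | cons p l ih =>
    simp only [List.foldl_cons]
    rw [ih, ih (str0 := if p.2 == 1 then "" ++ p.1 else if p.2 == 0 then "" ++ p.1 ++ "'" else "")]
    split_ifs <;> simp [String.append_assoc]

theorem pv_inner_eq (s0 : List (String × Int)) (str0 : String) :
    (PySem.Dict.ofList s0).keys.foldl
      (fun str j =>
        if (PySem.Dict.ofList s0).getD j 0 == 1 then str ++ j
        else if (PySem.Dict.ofList s0).getD j 0 == 0 then str ++ j ++ "'"
        else str) str0
    = str0 ++ pvTerm s0 := by
  have hkeys : (PySem.Dict.ofList s0).keys = (PySem.Dict.ofList s0).items.map Prod.fst := rfl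
  rw [hkeys, List.foldl_map]
  rw [PySem.List.foldl_congr_mem _ _
    (fun str jv =>
      if jv.2 == 1 then str ++ jv.1
      else if jv.2 == 0 then str ++ jv.1 ++ "'"
      else str) _ ?_]
  · exact pv_shift _ _
  · intro acc x hx
    have : (PySem.Dict.ofList s0).getD x.1 0 = x.2 :=
      PySem.Dict.getD_of_mem_items _ (by simpa using hx) (PySem.Dict.nodup_keys_ofList s0) 0
    simp [this]

theorem pv_join_nil (sep : String) : PySem.Str.join sep ([] : List String) = "" := by
  simp [PySem.Str.join, PySem.Chars.join_nil]
theorem pv_join_singleton (sep x : String) : PySem.Str.join sep [x] = x := by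
  simp [PySem.Str.join, PySem.Chars.join_singleton]
theorem pv_join_cons_cons (sep x y : String) (ys : List String) :
    PySem.Str.join sep (x :: y :: ys) = x ++ sep ++ PySem.Str.join sep (y :: ys) := by
  apply String.toList_inj.mp
  simp [PySem.Str.join, PySem.Chars.join_cons_cons]

theorem pv_join_empty_cons (x : String) (xs : List String) :
    PySem.Str.join "" (x :: xs) = x ++ PySem.Str.join "" xs := by
  cases xs with
  | nil => simp [pv_join_singleton, pv_join_nil]
  | cons y ys => rw [pv_join_cons_cons]; simp

-- B's filtered join equals A's inner fold
theorem pv_termB_gen (l : List (String × Int)) :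
    PySem.Str.join ""
      ((l.filter (fun jv => jv.2 == 0 || jv.2 == 1)).map
        (fun jv => if jv.2 == 1 then jv.1 else jv.1 ++ "'"))
    = l.foldl (fun term jv =>
        if jv.2 == 1 then term ++ jv.1
        else if jv.2 == 0 then term ++ jv.1 ++ "'"
        else term) "" := by
  induction l with
  | nil => simp [pv_join_nil]
  | cons jv l ih =>
    rw [List.foldl_cons, pv_shift]
    simp only [beq_iff_eq] at ih
    by_cases h1 : jv.2 = 1
    · simp [h1, pv_join_empty_cons, ih]
    · by_cases h0 : jv.2 = 0
      · simp [h0, pv_join_empty_cons, ih]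
      · simp [h0, h1, ih]

theorem pv_termB_eq (s : List (String × Int)) : pvTermB s = pvTerm s := by
  unfold pvTermB pvTerm
  exact pv_termB_gen _

-- B's backwards fold computes the join of the selected terms (plus a nonemptiness flag)
theorem pv_foldrB (L : List (List (String × Int) × Int)) :
    (L.foldr
      (fun st (acc : String × Bool) =>
        if st.2 == 1 then
          (pvTermB st.1 ++ (if acc.2 then " OR " ++ acc.1 else acc.1), true)
        else acc)
      ("", false))
    = (PySem.Str.join " OR " ((L.filter (fun st => st.2 == 1)).map (fun st => pvTermB st.1)),
       !((L.filter (fun st => st.2 == 1)).map (fun st => pvTermB st.1)).isEmpty) := by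
  induction L with
  | nil => simp [pv_join_nil]
  | cons st L ih =>
    rw [List.foldr_cons, ih]
    by_cases h : st.2 = 1
    · rw [if_pos (by simp [h]), List.filter_cons_of_pos (by simp [h]), List.map_cons]
      cases hT : (L.filter (fun st => st.2 == 1)).map (fun st => pvTermB st.1) with
      | nil => simp [pv_join_singleton, pv_join_nil]
      | cons y ys => simp [pv_join_cons_cons, String.append_assoc]
    · rw [if_neg (by simp [h]), List.filter_cons_of_neg (by simp [h])]

-- forward counter-based A result = join of the selected terms
theorem pv_outer (L : List (String × List (String × Int))) (total : Int) (acc : String) (k : Int)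
    (h : total = k + L.length) :
    (L.foldl (fun (st : String × Int) p =>
        ((if st.2 + 1 < total then (st.1 ++ pvTerm p.2) ++ " OR " else st.1 ++ pvTerm p.2), st.2 + 1))
       (acc, k)).1
    = acc ++ PySem.Str.join " OR " (L.map (fun p => pvTerm p.2)) := by
  induction L generalizing acc k with
  | nil => simp [pv_join_nil]
  | cons p l ih =>
    simp only [List.foldl_cons, List.map_cons]
    cases l with
    | nil =>
      have hcond : ¬ (k + 1 < total) := by
        simp only [List.length_cons, List.length_nil] at h; push_cast at h; omega
      simp [hcond, pv_join_singleton]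
    | cons q l' =>
      have hcond : k + 1 < total := by
        simp only [List.length_cons] at h; push_cast at h; omega
      rw [if_pos hcond]
      rw [ih (acc := (acc ++ pvTerm p.2) ++ " OR ") (k := k + 1)
        (by simp only [List.length_cons] at h ⊢; push_cast at h ⊢; omega)]
      rw [List.map_cons, pv_join_cons_cons]
      simp [String.append_assoc]

theorem pv_main (combinations : List (String × List (String × Int))) (tabl : List Int) :
    writingout combinations tabl = writingout_alt combinations tabl := by
  unfold writingout writingout_alt
  simp only []
  set c := PySem.Dict.ofList combinations with hc
  set N := List.foldl (fun d ij => if ij.2 == 1 then d.insert ij.1 (c.getD ij.1 []) else d) PySem.Dict.empty (c.keys.zip tabl) with hNdef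
  set F := (c.items.zip tabl).filter (fun p => p.2 == 1) with hF
  have hN : N.items = F.map (·.1) := pv_newdict_items combinations tabl
  have hkeysN : N.keys = (F.map (·.1)).map Prod.fst := by
    show N.items.map Prod.fst = _
    rw [hN]
  have hndN : N.keys.Nodup := by
    rw [hkeysN, List.map_map]
    exact pv_sel_nodup combinations tabl
  have hsize : N.size = F.length := by
    show N.items.length = _
    rw [hN, List.length_map]
  -- A side: counter fold → join of selected terms
  rw [hkeysN, List.foldl_map]
  rw [PySem.List.foldl_congr_mem _ _
      (fun (st : String × Int) p =>
        ((if st.2 + 1 < (N.size : Int) then (st.1 ++ pvTerm p.2) ++ " OR " else st.1 ++ pvTerm p.2),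
          st.2 + 1)) _ ?hbody]
  · rw [pv_outer (F.map (·.1)) (N.size : Int) "" 0 (by simp [hsize])]
    -- B side: backwards fold → join of selected terms
    have hvals : c.values = c.items.map Prod.snd := rfl
    rw [hvals, List.zip_map_left, pv_foldrB]
    rw [List.filter_map, List.map_map]
    have hp : ((fun (st : List (String × Int) × Int) => st.2 == 1) ∘ Prod.map Prod.snd id)
        = (fun (p : (String × List (String × Int)) × Int) => p.2 == 1) := by
      funext p; rfl
    rw [hp, ← hF]
    simp only [List.map_map]
    have hmapeq : List.map ((fun (st : List (String × Int) × Int) => pvTermB st.1) ∘ Prod.map Prod.snd id) F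
        = List.map ((fun (p : String × List (String × Int)) => pvTerm p.2) ∘ (fun (x : (String × List (String × Int)) × Int) => x.1)) F := by
      refine List.map_congr_left (fun a _ => ?_)
      simp [Prod.map, pv_termB_eq]
    rw [hmapeq]
    simp
  case hbody =>
    intro acc x hx
    have hmem : x ∈ N.items := by rw [hN]; exact hx
    have hget : N.getD x.1 [] = x.2 :=
      PySem.Dict.getD_of_mem_items N (by simpa using hmem) hndN []
    have hor : (" " ++ "OR" ++ " ") = " OR " := by decide
    simp only [hget, pv_inner_eq, hor]

-- ===== VERDICT (by name: the statement is the Claim_ definition above) =====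
theorem writingout_spec : Claim_equal_writingout := by
  intro combinations tabl _
  unfold Spec_writingout
  exact pv_main combinations tabl
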